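-- pv_equiv track=rewrite | github.com/masaimahapa/100daysofcode-with-python-course | days/16-18-listcomprehensions-generators/program.py | shortest_first_name
-- ===== SOURCE A (Python) =====
-- def dedup_and_title_case_names(names):
--     """Should return a list of names, each name appears only once"""
--     new_names=[]
--     titled_names= [name.title() for name in names ]
--     for each in titled_names:
--         if each not in new_names:
--             new_names.append(each)
--     return new_names
--
-- def shortest_first_name(names):
--     """Returns the shortest first name (str).
--        You can assume there is only one shortest name.
--     """
--     names = dedup_and_title_case_names(names)
--     names_only= [name.split()[0] for name in names]
--
--     shortest=names_only[0]
--     for each in names_only: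
--         if len(each)< len(shortest):
--             shortest= each
--     return shortest
-- ===== SOURCE B (Python) =====
-- def shortest_first_name(names):
--     """Returns the shortest first name (str).
--        You can assume there is only one shortest name.
--     """
--     first_names = [name.title().split()[0] for name in names]
--     return sorted(first_names, key=len)[0]
-- ===== Notes on version B (the rewrite author's own statement) =====
-- stated objective: faster
-- what changed: B drops the quadratic dedup pass entirely (duplicates can never change which shortest first name comes first), builds the first-name list in one comprehension, and reads the answer off the front of a stable length-keyed sort instead of a running-minimum scan over the deduplicated list.
import Mathlib
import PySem

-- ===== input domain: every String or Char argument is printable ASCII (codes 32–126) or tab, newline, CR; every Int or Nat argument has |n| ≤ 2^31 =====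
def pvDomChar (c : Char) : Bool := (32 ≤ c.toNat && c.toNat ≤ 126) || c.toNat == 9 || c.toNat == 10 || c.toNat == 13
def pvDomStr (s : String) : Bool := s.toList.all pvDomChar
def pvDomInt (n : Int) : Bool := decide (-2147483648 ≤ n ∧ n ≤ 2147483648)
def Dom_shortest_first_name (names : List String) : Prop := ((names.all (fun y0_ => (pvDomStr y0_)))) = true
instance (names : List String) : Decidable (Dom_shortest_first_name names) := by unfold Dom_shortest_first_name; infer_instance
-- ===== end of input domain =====

-- B drops A's dedup pass (duplicates never change the first shortest first name) and
-- reads the answer off the front of a stable length-keyed sort instead of a running-minimum scan.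

-- ===== PORT A =====
-- shared helper: Python str.title() on ASCII — a letter is uppercased after a non-letter,
-- lowercased after a letter (exact on the ASCII domain)
def pyTitleGo : List Char → Bool → List Char
  | [], _ => []
  | c :: rest, prevAlpha =>
      (if PySem.Chars.isalpha c then
        (if prevAlpha then PySem.Chars.lowerChar c else PySem.Chars.upperChar c)
      else c) :: pyTitleGo rest (PySem.Chars.isalpha c)

def pyTitle (s : String) : String := String.ofList (pyTitleGo s.toList false)

def dedup_and_title_case_names (names : List String) : List String :=
  let titled_names := names.map pyTitle
  titled_names.foldl (fun new_names each => if each ∈ new_names then new_names else new_names ++ [each]) []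

def shortest_first_name (names : List String) : String :=
  let names2 := dedup_and_title_case_names names
  let names_only := names2.map (fun name => (PySem.List.pyGet? (PySem.Str.split₀ name) 0).getD "")
  let shortest := (PySem.List.pyGet? names_only 0).getD ""
  names_only.foldl (fun shortest each => if PySem.Str.len each < PySem.Str.len shortest then each else shortest) shortest

-- ===== PORT B =====
def shortest_first_name_alt (names : List String) : String :=
  let first_names := names.map (fun name => (PySem.List.pyGet? (PySem.Str.split₀ (pyTitle name)) 0).getD "")
  (PySem.List.pyGet? (PySem.List.sorted first_names PySem.Str.len) 0).getD ""

-- ===== PRECONDITION & SPEC =====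
-- Pre_ excludes the empty list and lists containing an empty or all-whitespace name:
-- there Python A raises IndexError (names_only[0] resp. name.split()[0]).
def Pre_shortest_first_name (names : List String) : Prop :=
  names ≠ [] ∧ ∀ s ∈ names, (s.toList.all PySem.Chars.isspace) = false
instance (names : List String) : Decidable (Pre_shortest_first_name names) := by unfold Pre_shortest_first_name; infer_instance
def pvWitness_shortest_first_name : List String := ["bob smith", "al b", "bob smith"]

def Spec_shortest_first_name (names : List String) (out : String) : Prop := out = shortest_first_name_alt names
instance (names : List String) (out : String) : Decidable (Spec_shortest_first_name names out) := by unfold Spec_shortest_first_name; infer_instance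

-- ===== CLAIM (what is proved, stated in full; the proofs are below) =====
def Claim_equal_shortest_first_name : Prop := ∀ (names : List String), Dom_shortest_first_name names → Pre_shortest_first_name names → Spec_shortest_first_name names (shortest_first_name names)

-- ===== LEMMAS AND PROOFS =====
-- abbreviations used only by the proofs
def pvG (n : String) : String := (PySem.List.pyGet? (PySem.Str.split₀ n) 0).getD ""
def pvScan (a : String) (l : List String) : String :=
  l.foldl (fun sh e => if PySem.Str.len e < PySem.Str.len sh then e else sh) a
def pvStep (acc : List String) (e : String) : List String := if e ∈ acc then acc else acc ++ [e]

theorem pvScan_cons (a e : String) (l : List String) :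
    pvScan a (e :: l) = pvScan (if PySem.Str.len e < PySem.Str.len a then e else a) l := rfl

-- the dedup foldl only ever appends: its accumulator stays a prefix
theorem pvDedup_prefix (l acc : List String) :
    ∃ t, l.foldl pvStep acc = acc ++ t := by
  induction l generalizing acc with
  | nil => exact ⟨[], by simp⟩
  | cons e rest ih =>
    show ∃ t, rest.foldl pvStep (pvStep acc e) = acc ++ t
    unfold pvStep
    split_ifs with h
    · exact ih acc
    · obtain ⟨t, ht⟩ := ih (acc ++ [e])
      exact ⟨e :: t, by simpa using ht⟩

-- KEY: the running-minimum over the deduplicated tail equals the one over the raw tail,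
-- provided the seed is already ≤ every value recorded in the accumulator
theorem pvKey (l : List String) (acc : List String) (a : String)
    (hacc : ∀ e ∈ acc, PySem.Str.len a ≤ PySem.Str.len (pvG e)) :
    pvScan a ((((l.foldl pvStep acc).drop acc.length)).map pvG) = pvScan a (l.map pvG) := by
  induction l generalizing acc a with
  | nil => simp
  | cons e rest ih =>
    show pvScan a ((((rest.foldl pvStep (pvStep acc e)).drop acc.length)).map pvG) = _
    by_cases h : e ∈ acc
    · have hstep : pvStep acc e = acc := by simp [pvStep, h]
      rw [hstep, ih acc a hacc]
      have hle : PySem.Str.len a ≤ PySem.Str.len (pvG e) := hacc e h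
      simp only [List.map_cons, pvScan_cons]
      rw [if_neg (not_lt.mpr hle)]
    · have hstep : pvStep acc e = acc ++ [e] := by simp [pvStep, h]
      rw [hstep]
      obtain ⟨t, ht⟩ := pvDedup_prefix rest (acc ++ [e])
      set a' := if PySem.Str.len (pvG e) < PySem.Str.len a then pvG e else a with ha'
      have hacc' : ∀ e' ∈ acc ++ [e], PySem.Str.len a' ≤ PySem.Str.len (pvG e') := by
        intro e' he'
        rcases List.mem_append.mp he' with h1 | h2
        · refine le_trans ?_ (hacc e' h1)
          rw [ha']; split_ifs with hx
          · exact le_of_lt hx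
          · exact le_refl _
        · have : e' = e := by simpa using h2
          subst this
          rw [ha']; split_ifs with hx
          · exact le_refl _
          · exact not_lt.mp hx
      have ihr := ih (acc ++ [e]) a' hacc'
      rw [ht] at ihr ⊢
      have hdrop1 : ((acc ++ [e]) ++ t).drop acc.length = e :: t := by
        rw [List.append_assoc]; exact List.drop_left
      have hdrop2 : ((acc ++ [e]) ++ t).drop (acc ++ [e]).length = t := List.drop_left
      rw [hdrop2] at ihr
      rw [hdrop1]
      simp only [List.map_cons, pvScan_cons]
      rw [← ha', ihr]

-- stable insertion keeps the running strict-minimum at the head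
theorem pvInsertBy_cons {α : Type} (f : α → α → Bool) (x y : α) (ys : List α) :
    PySem.List.insertBy f x (y :: ys) = if f x y then x :: y :: ys else y :: PySem.List.insertBy f x ys := rfl

theorem pvInsertBy_head (l : List String) (c : String) (cs : List String) :
    ∃ ds, l.foldl (fun acc x => PySem.List.insertBy (fun a b => decide (PySem.Str.len a < PySem.Str.len b)) x acc) (c :: cs)
      = pvScan c l :: ds := by
  induction l generalizing c cs with
  | nil => exact ⟨cs, rfl⟩
  | cons e rest ih =>
    show ∃ ds, rest.foldl _ (PySem.List.insertBy (fun a b => decide (PySem.Str.len a < PySem.Str.len b)) e (c :: cs)) = pvScan c (e :: rest) :: ds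
    rw [pvScan_cons, pvInsertBy_cons]
    by_cases h : PySem.Str.len e < PySem.Str.len c
    · rw [if_pos (by exact decide_eq_true h), if_pos h]
      exact ih e (c :: cs)
    · rw [if_neg (by simpa using h), if_neg h]
      exact ih c _

theorem pvSorted_head (x : String) (l : List String) :
    ∃ ds, PySem.List.sorted (x :: l) PySem.Str.len = pvScan x l :: ds := by
  rw [PySem.List.sorted_eq_foldl_insertBy]
  exact pvInsertBy_head l x []

theorem pvGet0_cons {α : Type} (a : α) (l : List α) : PySem.List.pyGet? (a :: l) 0 = some a := by
  simp [PySem.List.pyGet?, PySem.List.pyIdx?]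

-- ===== VERDICT (by name: the statement is the Claim_ definition above) =====
theorem shortest_first_name_spec : Claim_equal_shortest_first_name := by
  intro names _ _
  unfold Spec_shortest_first_name
  cases names with
  | nil => rfl
  | cons n t =>
    obtain ⟨t0, ht0⟩ := pvDedup_prefix (t.map pyTitle) [pyTitle n]
    -- A's dedup pass yields pyTitle n :: t0
    have hd : dedup_and_title_case_names (n :: t) = pyTitle n :: t0 := by
      show List.foldl pvStep (pvStep [] (pyTitle n)) (t.map pyTitle) = pyTitle n :: t0
      rw [show pvStep [] (pyTitle n) = [pyTitle n] by simp [pvStep]]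
      simpa using ht0
    -- A is the running minimum over the deduplicated first names
    have hA : shortest_first_name (n :: t) = pvScan (pvG (pyTitle n)) (t0.map pvG) := by
      unfold shortest_first_name
      rw [hd]
      show pvScan ((PySem.List.pyGet? ((pyTitle n :: t0).map pvG) 0).getD "") ((pyTitle n :: t0).map pvG) = _
      rw [List.map_cons, pvGet0_cons, Option.getD_some, pvScan_cons, if_neg (lt_irrefl _)]
    -- B is the running minimum over all first names (head of the stable sort)
    have hB : shortest_first_name_alt (n :: t) = pvScan (pvG (pyTitle n)) ((t.map pyTitle).map pvG) := by
      unfold shortest_first_name_alt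
      show (PySem.List.pyGet? (PySem.List.sorted ((n :: t).map (fun name => pvG (pyTitle name))) PySem.Str.len) 0).getD "" = _
      rw [List.map_cons]
      rw [show t.map (fun name => pvG (pyTitle name)) = (t.map pyTitle).map pvG by
        rw [List.map_map]; rfl]
      obtain ⟨ds, hds⟩ := pvSorted_head (pvG (pyTitle n)) ((t.map pyTitle).map pvG)
      rw [hds, pvGet0_cons, Option.getD_some]
    -- the two running minima coincide (KEY)
    have hkey := pvKey (t.map pyTitle) [pyTitle n] (pvG (pyTitle n))
      (by intro e he; simp at he; subst he; exact le_refl _)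
    rw [ht0] at hkey
    simp only [List.singleton_append, List.length_cons, List.length_nil, List.drop_succ_cons,
      List.drop_zero] at hkey
    exact hA.trans (hkey.trans hB.symm)
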